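-- pv_equiv track=rewrite | github.com/RamiELB/projet_align | D.py | coupure
-- ===== SOURCE A (Python) =====
-- c_del = 2
--
-- c_ins = 2
--
-- def sub(a,b):
--     """ Prend en entrée deux lettres et
--         renvoie le coût de substition """
--     if a == b:
--         return 0
--
--     if a in ['A', 'T']:
--         if b in ['A', 'T']:
--             return 3
--         return 4
--
--     if b in ['G', 'C']:
--         return 3
--
--     return 4
--
-- def coupure(x,y):
--     """ Prend en entrée deux mots x et y
--     et renvoie l'indice j* de la meilleur coupure
--     associée à i* """
--     """ On s'appuye sur la foncton dist_2 de la tache C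
--     il suffit cependant de s'arrêter à la ligne i*.
--     Ainsi, la meilleur coupure sera là où le coût est minimum sur
--     la ligne i* """
--
--     prec = [0]
--     m = len(y)+1
--     stop = len(x) // 2
--         # Première ligne
--     for j in range(m):
--         prec.append((j+1)* c_del)
--     for i in range(1,stop+1):
--         D = []
--         for j in range(m):
--             if j == 0:
--                 D.append(i * c_ins)
--                 min_c = i * c_ins
--                 indice_min = j
--             else:
--                 c = prec[j-1] + sub(x[i-1],y[j-1])
--                 if prec[j] + c_del < c:
--                     c = prec[j] + c_del
--                 if D[j-1] + c_ins < c: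
--                     c = D[j-1] + c_ins
--                 D.append(c)
--                 if c <= min_c:
--                     min_c = c
--                     indice_min = j
--         prec = D
--     return indice_min
-- ===== SOURCE B (Python) =====
-- c_del = 2
--
-- c_ins = 2
--
-- def sub(a, b):
--     if a == b:
--         return 0
--     if a in ['A', 'T']:
--         if b in ['A', 'T']:
--             return 3
--         return 4
--     if b in ['G', 'C']:
--         return 3
--     return 4
--
-- def coupure(x, y):
--     """Column-major sweep: the (stop+1) x (len(y)+1) DP table is filled one
--     COLUMN (height stop+1) at a time instead of one row (width len(y)+1);
--     the bottom cell of each finished column feeds the running argmin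
--     (<= keeps the last minimal column index)."""
--     stop = len(x) // 2
--     half = x[:stop]
--     col = [i * c_ins for i in range(stop + 1)]
--     best, arg = col[stop], 0
--     for j, b in enumerate(y, 1):
--         new = [j * c_del]
--         for i, a in enumerate(half, 1):
--             new.append(min(col[i - 1] + sub(a, b), new[i - 1] + c_del, col[i] + c_ins))
--         col = new
--         if col[stop] <= best:
--             best, arg = col[stop], j
--     return arg
-- ===== Notes on version B (the rewrite author's own statement) =====
-- stated objective: alternative
-- what changed: B fills the DP table column-by-column (a rolling column of height len(x)//2+1, transposed traversal) instead of A's row-by-row sweep of width len(y)+1, and tracks the running argmin over the bottom cell of each completed column rather than over the cells of the final row.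
import Mathlib
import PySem

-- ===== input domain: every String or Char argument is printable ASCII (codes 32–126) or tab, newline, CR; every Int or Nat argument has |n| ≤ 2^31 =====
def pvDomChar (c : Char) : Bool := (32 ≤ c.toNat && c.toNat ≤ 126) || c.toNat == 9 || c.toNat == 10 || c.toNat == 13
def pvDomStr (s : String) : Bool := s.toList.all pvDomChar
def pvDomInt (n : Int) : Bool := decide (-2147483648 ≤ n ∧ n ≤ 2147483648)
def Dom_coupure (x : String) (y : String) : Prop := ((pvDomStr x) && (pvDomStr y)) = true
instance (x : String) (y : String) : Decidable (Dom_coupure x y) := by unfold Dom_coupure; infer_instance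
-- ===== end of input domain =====

-- B fills the DP table column-by-column (rolling column, transposed traversal)
-- instead of A's row-by-row sweep, tracking the argmin over bottom cells of
-- completed columns; same asymptotic cost, alternative decomposition.

-- ===== PORT A =====
-- helper 'sub' of the module (shared by both Pythons)
def subC (a : Char) (b : Char) : Int :=
  if a = b then 0
  else if a = 'A' ∨ a = 'T' then
    if b = 'A' ∨ b = 'T' then 3 else 4
  else if b = 'G' ∨ b = 'C' then 3
  else 4

-- A's inner 'for j in range(m)' loop, state (D, min_c, indice_min); indices stay
-- in range on every use, so list.getD is exact for Python's l[k] here.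
def innerA (prec : List Int) (xi : Char) (ys : List Char) (i : Nat)
    (mn0 : Int) (idx0 : Int) : List Int × Int × Int :=
  (List.range (ys.length + 1)).foldl
    (fun t j =>
      if j = 0 then (t.1 ++ [(i : Int) * 2], (i : Int) * 2, (0 : Int))
      else
        let c1 := prec.getD (j - 1) 0 + subC xi (ys.getD (j - 1) ' ')
        let c2 := if prec.getD j 0 + 2 < c1 then prec.getD j 0 + 2 else c1
        let c := if t.1.getD (j - 1) 0 + 2 < c2 then t.1.getD (j - 1) 0 + 2 else c2
        (t.1 ++ [c],
         if c ≤ t.2.1 then c else t.2.1,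
         if c ≤ t.2.1 then (j : Int) else t.2.2))
    ([], mn0, idx0)

def coupure (x : String) (y : String) : Int :=
  let xs := x.toList
  let ys := y.toList
  let prec0 : List Int := 0 :: (List.range (ys.length + 1)).map (fun (j : Nat) => ((j : Int) + 1) * 2)
  let st := (List.range' 1 (xs.length / 2)).foldl
      (fun st i => innerA st.1 (xs.getD (i - 1) ' ') ys i st.2.1 st.2.2)
      (prec0, 0, 0)
  st.2.2

-- ===== PORT B =====
-- Source B's inner 'for i, a in enumerate(half, 1)' loop extending the new column
def colStepB (b : Char) (last : Int) : List Int → List Char → List Int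
  | c0 :: c1 :: cs, a :: as =>
    let v := min (min (c0 + subC a b) (last + 2)) (c1 + 2)
    v :: colStepB b v (c1 :: cs) as
  | _, _ => []

def coupure_alt (x : String) (y : String) : Int :=
  let xs := x.toList
  let ys := y.toList
  let stop := xs.length / 2
  let half := xs.take stop
  let col0 := (List.range (stop + 1)).map (fun (i : Nat) => (i : Int) * 2)
  let st := (ys.zipIdx 1).foldl
      (fun st p =>
        let newcol := ((p.2 : Int)) * 2 :: colStepB p.1 ((p.2 : Int) * 2) st.1 half
        if newcol.getD stop 0 ≤ st.2.1 then (newcol, newcol.getD stop 0, ((p.2 : Nat) : Int))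
        else (newcol, st.2.1, st.2.2))
      (col0, col0.getD stop 0, (0 : Int))
  st.2.2

-- ===== PRECONDITION & SPEC =====
-- Pre_ excludes len(x) < 2: there A's row loop never runs and 'return indice_min'
-- raises UnboundLocalError (no value of the declared type).
def Pre_coupure (x : String) (y : String) : Prop := 2 ≤ x.toList.length
instance (x : String) (y : String) : Decidable (Pre_coupure x y) := by
  unfold Pre_coupure; infer_instance
def pvWitness_coupure : String × String := ("ab", "b")

def Spec_coupure (x : String) (y : String) (out : Int) : Prop := out = coupure_alt x y
instance (x : String) (y : String) (out : Int) : Decidable (Spec_coupure x y out) := by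
  unfold Spec_coupure; infer_instance

-- ===== CLAIM (what is proved, stated in full; the proofs are below) =====
def Claim_equal_coupure : Prop := ∀ (x : String) (y : String), Dom_coupure x y →
  Pre_coupure x y → Spec_coupure x y (coupure x y)

-- ===== LEMMAS AND PROOFS =====

-- the common DP table: dspec i j = cost D[i][j] of A's/B's recurrence
def dspec (xs ys : List Char) : Nat → Nat → Int
  | 0, j => (j : Int) * 2
  | i + 1, 0 => ((i : Int) + 1) * 2
  | i + 1, j + 1 =>
      min (min (dspec xs ys i j + subC (xs.getD i ' ') (ys.getD j ' '))
           (dspec xs ys i (j + 1) + 2))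
        (dspec xs ys (i + 1) j + 2)
  termination_by i j => (i, j)

-- A's running (min_c, indice_min) tracker, element index carried explicitly
def track : List Int → Nat → Int × Int → Int × Int
  | [], _, st => st
  | v :: vs, j, st => track vs (j + 1) (if v ≤ st.1 then (v, (j : Int)) else st)

-- row-major rolling-row builder (proof-side; characterises A's rows)
def rowStepB (ch : Char) (last : Int) : List Int → List Char → List Int
  | p0 :: p1 :: ps, b :: bs =>
    let c := min (min (p0 + subC ch b) (p1 + 2)) (last + 2)
    c :: rowStepB ch c (p1 :: ps) bs
  | _, _ => []

def nextRowB (ch : Char) (prev : List Int) (ys : List Char) : List Int :=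
  (prev.getD 0 0 + 2) :: rowStepB ch (prev.getD 0 0 + 2) prev ys

theorem track_append (l1 l2 : List Int) (j : Nat) (st : Int × Int) :
    track (l1 ++ l2) j st = track l2 (j + l1.length) (track l1 j st) := by
  induction l1 generalizing j st with
  | nil => simp [track]
  | cons v vs ih => simp [track, ih]; ring_nf

theorem rowStepB_length (ch : Char) : ∀ (bs : List Char) (prev : List Int) (last : Int),
    prev.length = bs.length + 1 → (rowStepB ch last prev bs).length = bs.length := by
  intro bs
  induction bs with
  | nil => intro prev last h; cases prev with
    | nil => simp at h
    | cons p0 ps => simp [rowStepB]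
  | cons b bs ih =>
    intro prev last h
    match prev with
    | p0 :: p1 :: ps =>
      simp only [rowStepB, List.length_cons]
      rw [ih (p1 :: ps) _ (by simpa using h)]

theorem rowStepB_chain (ch : Char) : ∀ (bs : List Char) (prev : List Int) (last : Int)
    (k : Nat), prev.length = bs.length + 1 → k < bs.length →
    (rowStepB ch last prev bs).getD k 0 =
      min (min (prev.getD k 0 + subC ch (bs.getD k ' ')) (prev.getD (k + 1) 0 + 2))
        ((if k = 0 then last else (rowStepB ch last prev bs).getD (k - 1) 0) + 2) := by
  intro bs
  induction bs with
  | nil => intro prev last k h hk; simp at hk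
  | cons b bs ih =>
    intro prev last k h hk
    match prev with
    | p0 :: p1 :: ps =>
      cases k with
      | zero => simp [rowStepB]
      | succ k' =>
        simp only [rowStepB, List.getD_cons_succ]
        rw [ih (p1 :: ps) _ k' (by simpa using h) (by simpa using hk)]
        cases k' with
        | zero => simp
        | succ k'' => simp

theorem getD_take {α : Type} (l : List α) (d : α) (s m : Nat) (h : m < s) :
    (l.take s).getD m d = l.getD m d := by
  simp [List.getD_eq_getElem?_getD, h]

theorem take_concat_getD' {α : Type} (l : List α) (d : α) (s : Nat) (h : s < l.length) :
    l.take s ++ [l.getD s d] = l.take (s + 1) := by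
  rw [List.take_add_one]
  simp [List.getD_eq_getElem?_getD, List.getElem?_eq_getElem h]

theorem cascade_min (a b d : Int) :
    (if d < (if b < a then b else a) then d else (if b < a then b else a)) = min (min a b) d := by
  simp only [min_def]; split_ifs <;> omega

theorem nextRowB_length (xi : Char) (prevB : List Int) (ys : List Char)
    (hlen : prevB.length = ys.length + 1) :
    (nextRowB xi prevB ys).length = ys.length + 1 := by
  simp [nextRowB, rowStepB_length xi ys prevB _ hlen]

theorem nextRowB_getD_succ (xi : Char) (prevB : List Int) (ys : List Char) (s : Nat)
    (hlen : prevB.length = ys.length + 1) (h1 : 1 ≤ s) (hs : s ≤ ys.length) :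
    (nextRowB xi prevB ys).getD s 0 =
      min (min (prevB.getD (s - 1) 0 + subC xi (ys.getD (s - 1) ' ')) (prevB.getD s 0 + 2))
        ((nextRowB xi prevB ys).getD (s - 1) 0 + 2) := by
  obtain ⟨k, rfl⟩ : ∃ k, s = k + 1 := ⟨s - 1, by omega⟩
  have hk : k < ys.length := by omega
  cases k with
  | zero =>
    have h0 := rowStepB_chain xi ys prevB (prevB.getD 0 0 + 2) 0 hlen hk
    rw [if_pos rfl] at h0
    simp only [nextRowB, List.getD_cons_succ, List.getD_cons_zero, Nat.add_sub_cancel]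
    rw [h0]
  | succ k' =>
    have h0 := rowStepB_chain xi ys prevB (prevB.getD 0 0 + 2) (k' + 1) hlen hk
    rw [if_neg (Nat.succ_ne_zero k')] at h0
    simp only [Nat.add_sub_cancel] at h0
    simp only [nextRowB, List.getD_cons_succ, Nat.add_sub_cancel]
    rw [h0]

theorem innerA_loop (ys : List Char) (prec prevB : List Int) (xi : Char) (i : Nat)
    (hag : ∀ k, k ≤ ys.length → prec.getD k 0 = prevB.getD k 0)
    (hlen : prevB.length = ys.length + 1) :
    ∀ (r s : Nat) (mn idx : Int), 1 ≤ s → s + r = ys.length + 1 →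
    (mn, idx) = track (((nextRowB xi prevB ys).drop 1).take (s - 1)) 1 ((i : Int) * 2, 0) →
    (List.range' s r).foldl
      (fun t j =>
        if j = 0 then (t.1 ++ [(i : Int) * 2], (i : Int) * 2, (0 : Int))
        else
          let c1 := prec.getD (j - 1) 0 + subC xi (ys.getD (j - 1) ' ')
          let c2 := if prec.getD j 0 + 2 < c1 then prec.getD j 0 + 2 else c1
          let c := if t.1.getD (j - 1) 0 + 2 < c2 then t.1.getD (j - 1) 0 + 2 else c2
          (t.1 ++ [c],
           if c ≤ t.2.1 then c else t.2.1,
           if c ≤ t.2.1 then (j : Int) else t.2.2))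
      ((nextRowB xi prevB ys).take s, mn, idx)
    = (nextRowB xi prevB ys, track ((nextRowB xi prevB ys).drop 1) 1 ((i : Int) * 2, 0)) := by
  set R := nextRowB xi prevB ys with hR
  have hRlen : R.length = ys.length + 1 := nextRowB_length xi prevB ys hlen
  intro r
  induction r with
  | zero =>
    intro s mn idx h1 hsum htr
    have hs : s = ys.length + 1 := by omega
    subst hs
    have e1 : R.take (ys.length + 1) = R := List.take_of_length_le (by omega)
    have e2 : (R.drop 1).take (ys.length + 1 - 1) = R.drop 1 :=
      List.take_of_length_le (by simp [hRlen])
    rw [e2, List.drop_one] at htr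
    simp [e1, ← htr]
  | succ r ih =>
    intro s mn idx h1 hsum htr
    have hsle : s ≤ ys.length := by omega
    rw [List.range'_succ, List.foldl_cons]
    have hj0 : ¬ (s = 0) := by omega
    simp only [hj0, if_false]
    have hpa : prec.getD (s - 1) 0 = prevB.getD (s - 1) 0 := hag _ (by omega)
    have hpb : prec.getD s 0 = prevB.getD s 0 := hag _ hsle
    have hDg : (R.take s).getD (s - 1) 0 = R.getD (s - 1) 0 := getD_take R 0 s (s - 1) (by omega)
    have hc : (if (R.take s).getD (s - 1) 0 + 2 <
          (if prec.getD s 0 + 2 < prec.getD (s - 1) 0 + subC xi (ys.getD (s - 1) ' ')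
           then prec.getD s 0 + 2
           else prec.getD (s - 1) 0 + subC xi (ys.getD (s - 1) ' '))
        then (R.take s).getD (s - 1) 0 + 2
        else (if prec.getD s 0 + 2 < prec.getD (s - 1) 0 + subC xi (ys.getD (s - 1) ' ')
              then prec.getD s 0 + 2
              else prec.getD (s - 1) 0 + subC xi (ys.getD (s - 1) ' '))) = R.getD s 0 := by
      have hrec := nextRowB_getD_succ xi prevB ys s hlen h1 hsle
      rw [← hR] at hrec
      rw [hDg, hpa, hpb,
        cascade_min (prevB.getD (s - 1) 0 + subC xi (ys.getD (s - 1) ' '))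
          (prevB.getD s 0 + 2) (R.getD (s - 1) 0 + 2), hrec]
    simp only [hc]
    have hDext : R.take s ++ [R.getD s 0] = R.take (s + 1) :=
      take_concat_getD' R 0 s (by omega)
    have hw : (R.drop 1).getD (s - 1) 0 = R.getD s 0 := by
      simp only [List.getD_eq_getElem?_getD, List.getElem?_drop]
      congr 2
      omega
    have htr' : ((if R.getD s 0 ≤ mn then R.getD s 0 else mn),
        (if R.getD s 0 ≤ mn then (s : Int) else idx)) =
        track ((R.drop 1).take (s + 1 - 1)) 1 ((i : Int) * 2, 0) := by
      have hlt : s - 1 < (R.drop 1).length := by simp [hRlen]; omega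
      rw [show s + 1 - 1 = (s - 1) + 1 from by omega, ← take_concat_getD' (R.drop 1) 0 (s-1) hlt,
        track_append, ← htr, hw]
      have : 1 + ((R.drop 1).take (s - 1)).length = s := by
        simp [List.length_take]; omega
      rw [this]
      simp only [track]
      split_ifs with h
      · simp
      · simp
    rw [hDext]
    exact ih (s + 1) _ _ (by omega) (by omega) htr'

theorem innerA_spec (ys : List Char) (prec prevB : List Int) (xi : Char) (i : Nat)
    (mn0 idx0 : Int)
    (hag : ∀ k, k ≤ ys.length → prec.getD k 0 = prevB.getD k 0)
    (hlen : prevB.length = ys.length + 1)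
    (hp0 : prevB.getD 0 0 + 2 = (i : Int) * 2) :
    innerA prec xi ys i mn0 idx0 =
      (nextRowB xi prevB ys, track ((nextRowB xi prevB ys).drop 1) 1 ((i : Int) * 2, 0)) := by
  unfold innerA
  rw [List.range_eq_range', List.range'_succ, List.foldl_cons]
  simp only [List.nil_append]
  have h1 : [(i : Int) * 2] = (nextRowB xi prevB ys).take 1 := by
    simp [nextRowB, ← hp0]
  have hmain := innerA_loop ys prec prevB xi i hag hlen ys.length 1 ((i : Int) * 2) 0 le_rfl
    (by omega) (by simp [track])
  rw [← h1] at hmain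
  exact hmain

theorem getD_map_range (n k : Nat) (f : Nat → Int) (h : k < n) :
    ((List.range n).map f).getD k 0 = f k := by
  simp [List.getD_eq_getElem?_getD, h]

theorem outer_inv (xs ys : List Char) : ∀ (t : Nat), t ≤ xs.length / 2 →
    (∀ k, k ≤ ys.length →
      (((List.range' 1 t).foldl
          (fun st i => innerA st.1 (xs.getD (i - 1) ' ') ys i st.2.1 st.2.2)
          (0 :: (List.range (ys.length + 1)).map (fun (j : Nat) => ((j : Int) + 1) * 2), 0, 0)).1).getD k 0 =
        ((xs.take t).foldl
          (fun row ch => (row.getD 0 0 + 2) :: rowStepB ch (row.getD 0 0 + 2) row ys)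
          ((List.range (ys.length + 1)).map (fun (j : Nat) => (j : Int) * 2))).getD k 0) ∧
    ((xs.take t).foldl
        (fun row ch => (row.getD 0 0 + 2) :: rowStepB ch (row.getD 0 0 + 2) row ys)
        ((List.range (ys.length + 1)).map (fun (j : Nat) => (j : Int) * 2))).length = ys.length + 1 ∧
    ((xs.take t).foldl
        (fun row ch => (row.getD 0 0 + 2) :: rowStepB ch (row.getD 0 0 + 2) row ys)
        ((List.range (ys.length + 1)).map (fun (j : Nat) => (j : Int) * 2))).getD 0 0 = (t : Int) * 2 ∧
    (1 ≤ t →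
      ((List.range' 1 t).foldl
          (fun st i => innerA st.1 (xs.getD (i - 1) ' ') ys i st.2.1 st.2.2)
          (0 :: (List.range (ys.length + 1)).map (fun (j : Nat) => ((j : Int) + 1) * 2), 0, 0)).2 =
        track (((xs.take t).foldl
            (fun row ch => (row.getD 0 0 + 2) :: rowStepB ch (row.getD 0 0 + 2) row ys)
            ((List.range (ys.length + 1)).map (fun (j : Nat) => (j : Int) * 2))).drop 1) 1
          (((xs.take t).foldl
              (fun row ch => (row.getD 0 0 + 2) :: rowStepB ch (row.getD 0 0 + 2) row ys)
              ((List.range (ys.length + 1)).map (fun (j : Nat) => (j : Int) * 2))).getD 0 0, 0)) := by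
  intro t
  induction t with
  | zero =>
    intro _
    refine ⟨?_, by simp, by rw [List.take_zero, List.foldl_nil, getD_map_range _ _ _ (by omega)], by omega⟩
    intro k hk
    cases k with
    | zero =>
      simp only [List.range'_zero, List.foldl_nil, List.take_zero, List.getD_cons_zero]
      rw [getD_map_range _ _ _ (by omega)]
      simp
    | succ k' =>
      simp only [List.range'_zero, List.foldl_nil, List.take_zero, List.getD_cons_succ]
      rw [getD_map_range _ _ _ (by omega), getD_map_range _ _ _ (by omega)]
      push_cast
      ring
  | succ t ih =>
    intro hle
    obtain ⟨hag, hlen, hhead, htrk⟩ := ih (by omega)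
    have hxlen : t < xs.length := by
      have := Nat.div_le_self xs.length 2
      omega
    have hrange : List.range' 1 (t + 1) = List.range' 1 t ++ [1 + t] := List.range'_1_concat
    have htake : xs.take (t + 1) = xs.take t ++ [xs.getD t ' '] :=
      (take_concat_getD' xs ' ' t hxlen).symm
    rw [hrange, htake, List.foldl_append, List.foldl_append]
    simp only [List.foldl_cons, List.foldl_nil]
    set sA := (List.range' 1 t).foldl
        (fun st i => innerA st.1 (xs.getD (i - 1) ' ') ys i st.2.1 st.2.2)
        (0 :: (List.range (ys.length + 1)).map (fun (j : Nat) => ((j : Int) + 1) * 2), 0, 0) with hsA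
    set rB := (xs.take t).foldl
        (fun row ch => (row.getD 0 0 + 2) :: rowStepB ch (row.getD 0 0 + 2) row ys)
        ((List.range (ys.length + 1)).map (fun (j : Nat) => (j : Int) * 2)) with hrB
    have hp0 : rB.getD 0 0 + 2 = ((1 + t : Nat) : Int) * 2 := by
      rw [hhead]; push_cast; ring
    have hspec := innerA_spec ys sA.1 rB (xs.getD ((1 + t) - 1) ' ') (1 + t) sA.2.1 sA.2.2
      hag hlen hp0
    rw [show (1 + t) - 1 = t from by omega] at hspec ⊢
    rw [hspec]
    have hnext : ∀ (row : List Int) (ch : Char),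
        (row.getD 0 0 + 2) :: rowStepB ch (row.getD 0 0 + 2) row ys = nextRowB ch row ys := by
      intro row ch; rfl
    rw [hnext]
    refine ⟨fun k _ => rfl, nextRowB_length _ _ _ hlen, ?_, fun _ => ?_⟩
    · show (nextRowB _ _ _).getD 0 0 = _
      simp only [nextRowB, List.getD_cons_zero]
      rw [hhead]; push_cast; ring
    · show track _ 1 _ = track _ 1 _
      have h2 : ((1 + t : Nat) : Int) * 2 = (nextRowB (xs.getD t ' ') rB ys).getD 0 0 := by
        simp only [nextRowB, List.getD_cons_zero]
        rw [hhead]; push_cast; ring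
      rw [h2]

-- the recursive form of A's rows
def rowR (xs ys : List Char) : Nat → List Int
  | 0 => (List.range (ys.length + 1)).map (fun (j : Nat) => (j : Int) * 2)
  | t + 1 => nextRowB (xs.getD t ' ') (rowR xs ys t) ys

theorem rowFold_eq_rowR (xs ys : List Char) : ∀ t, t ≤ xs.length →
    (xs.take t).foldl
      (fun row ch => (row.getD 0 0 + 2) :: rowStepB ch (row.getD 0 0 + 2) row ys)
      ((List.range (ys.length + 1)).map (fun (j : Nat) => (j : Int) * 2)) = rowR xs ys t := by
  intro t
  induction t with
  | zero => intro _; simp [rowR]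
  | succ t ih =>
    intro h
    have htake : xs.take (t + 1) = xs.take t ++ [xs.getD t ' '] :=
      (take_concat_getD' xs ' ' t (by omega)).symm
    rw [htake, List.foldl_append, ih (by omega)]
    rfl

theorem rowR_length (xs ys : List Char) : ∀ t, (rowR xs ys t).length = ys.length + 1 := by
  intro t
  induction t with
  | zero => simp [rowR]
  | succ t ih => simpa [rowR] using nextRowB_length _ _ _ ih

theorem dspec_top (xs ys : List Char) (i : Nat) : dspec xs ys i 0 = (i : Int) * 2 := by
  cases i with
  | zero => rw [dspec]
  | succ i' => rw [dspec]; push_cast; ring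

theorem row_eq_dspec (xs ys : List Char) : ∀ t j, j ≤ ys.length →
    (rowR xs ys t).getD j 0 = dspec xs ys t j := by
  intro t
  induction t with
  | zero =>
    intro j hj
    rw [rowR, getD_map_range _ _ _ (by omega), dspec]
  | succ t iht =>
    intro j
    induction j with
    | zero =>
      intro _
      show (nextRowB _ _ _).getD 0 0 = _
      simp only [nextRowB, List.getD_cons_zero]
      rw [iht 0 (by omega), dspec_top, dspec_top]
      push_cast
      ring
    | succ j ihj =>
      intro hj
      show (nextRowB _ _ _).getD (j+1) 0 = _
      rw [nextRowB_getD_succ _ _ _ (j+1) (rowR_length xs ys t) (by omega) hj]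
      simp only [Nat.add_sub_cancel]
      rw [iht j (by omega), iht (j+1) hj]
      have h' : (nextRowB (xs.getD t ' ') (rowR xs ys t) ys).getD j 0 = dspec xs ys (t + 1) j :=
        ihj (by omega)
      rw [dspec, h']

-- B side: column lemmas
theorem colStepB_length (b : Char) : ∀ (as : List Char) (col : List Int) (last : Int),
    col.length = as.length + 1 → (colStepB b last col as).length = as.length := by
  intro as
  induction as with
  | nil => intro col last h; cases col with
    | nil => simp at h
    | cons c0 cs => simp [colStepB]
  | cons a as ih =>
    intro col last h
    match col with
    | c0 :: c1 :: cs =>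
      simp only [colStepB, List.length_cons]
      rw [ih (c1 :: cs) _ (by simpa using h)]

theorem colStepB_chain (b : Char) : ∀ (as : List Char) (col : List Int) (last : Int)
    (k : Nat), col.length = as.length + 1 → k < as.length →
    (colStepB b last col as).getD k 0 =
      min (min (col.getD k 0 + subC (as.getD k ' ') b)
           ((if k = 0 then last else (colStepB b last col as).getD (k - 1) 0) + 2))
        (col.getD (k + 1) 0 + 2) := by
  intro as
  induction as with
  | nil => intro col last k h hk; simp at hk
  | cons a as ih =>
    intro col last k h hk
    match col with
    | c0 :: c1 :: cs =>
      cases k with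
      | zero => simp [colStepB]
      | succ k' =>
        simp only [colStepB, List.getD_cons_succ]
        rw [ih (c1 :: cs) _ k' (by simpa using h) (by simpa using hk)]
        cases k' with
        | zero => simp
        | succ k'' => simp

-- B's columns, recursively
def colF (xs ys : List Char) : Nat → List Int
  | 0 => (List.range (xs.length / 2 + 1)).map (fun (i : Nat) => (i : Int) * 2)
  | j + 1 => (((j : Int) + 1) * 2) ::
      colStepB (ys.getD j ' ') (((j : Int) + 1) * 2) (colF xs ys j) (xs.take (xs.length / 2))

theorem colF_length (xs ys : List Char) : ∀ j, (colF xs ys j).length = xs.length / 2 + 1 := by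
  intro j
  induction j with
  | zero => simp [colF]
  | succ j ih =>
    have hh : (xs.take (xs.length / 2)).length = xs.length / 2 :=
      List.length_take_of_le (Nat.div_le_self _ _)
    simp only [colF, List.length_cons]
    rw [colStepB_length _ _ _ _ (by rw [ih, hh])]
    rw [hh]

theorem colF_getD_succ (xs ys : List Char) (j i : Nat) (h1 : 1 ≤ i)
    (hi : i ≤ xs.length / 2) :
    (colF xs ys (j + 1)).getD i 0 =
      min (min ((colF xs ys j).getD (i - 1) 0 + subC (xs.getD (i - 1) ' ') (ys.getD j ' '))
           ((colF xs ys (j + 1)).getD (i - 1) 0 + 2))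
        ((colF xs ys j).getD i 0 + 2) := by
  have hh : (xs.take (xs.length / 2)).length = xs.length / 2 :=
    List.length_take_of_le (Nat.div_le_self _ _)
  have hha : ∀ k, k < xs.length / 2 → (xs.take (xs.length / 2)).getD k ' ' = xs.getD k ' ' :=
    fun k hk => getD_take xs ' ' _ k hk
  obtain ⟨k, rfl⟩ : ∃ k, i = k + 1 := ⟨i - 1, by omega⟩
  have hk : k < (xs.take (xs.length / 2)).length := by omega
  cases k with
  | zero =>
    have h0 := colStepB_chain (ys.getD j ' ') (xs.take (xs.length / 2)) (colF xs ys j)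
      (((j : Int) + 1) * 2) 0 (by rw [colF_length, hh]) hk
    rw [if_pos rfl] at h0
    simp only [colF, List.getD_cons_succ, List.getD_cons_zero, Nat.add_sub_cancel]
    rw [h0, hha 0 (by omega)]
  | succ k' =>
    have h0 := colStepB_chain (ys.getD j ' ') (xs.take (xs.length / 2)) (colF xs ys j)
      (((j : Int) + 1) * 2) (k' + 1) (by rw [colF_length, hh]) hk
    rw [if_neg (Nat.succ_ne_zero k')] at h0
    simp only [Nat.add_sub_cancel] at h0
    simp only [colF, List.getD_cons_succ, Nat.add_sub_cancel]
    rw [h0, hha (k' + 1) (by omega)]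

theorem col_eq_dspec (xs ys : List Char) : ∀ j i, i ≤ xs.length / 2 →
    (colF xs ys j).getD i 0 = dspec xs ys i j := by
  intro j
  induction j with
  | zero =>
    intro i hi
    rw [colF, getD_map_range _ _ _ (by omega), dspec_top]
  | succ j ihj =>
    intro i
    induction i with
    | zero =>
      intro _
      show (colF xs ys (j + 1)).getD 0 0 = _
      simp only [colF, List.getD_cons_zero]
      rw [dspec]
      push_cast; ring
    | succ i ihi =>
      intro hi
      rw [colF_getD_succ xs ys j (i + 1) (by omega) hi]
      simp only [Nat.add_sub_cancel]
      rw [ihj i (by omega), ihj (i + 1) hi, ihi (by omega)]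
      rw [dspec]

-- B's outer loop over enumerate(y, 1)
theorem loopB (xs ys : List Char) : ∀ (cs : List Char) (n : Nat) (st : Int × Int),
    cs = ys.drop n → n ≤ ys.length →
    (cs.zipIdx (n + 1)).foldl
      (fun st p =>
        let newcol := ((p.2 : Int)) * 2 ::
          colStepB p.1 ((p.2 : Int) * 2) st.1 (xs.take (xs.length / 2))
        if newcol.getD (xs.length / 2) 0 ≤ st.2.1 then
          (newcol, newcol.getD (xs.length / 2) 0, ((p.2 : Nat) : Int))
        else (newcol, st.2.1, st.2.2))
      (colF xs ys n, st)
    = (colF xs ys ys.length,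
       track ((List.range' (n + 1) (ys.length - n)).map
         (fun j => (colF xs ys j).getD (xs.length / 2) 0)) (n + 1) st) := by
  intro cs
  induction cs with
  | nil =>
    intro n st h hn
    have hge : ys.length ≤ n := by
      by_contra hx
      have : ys.drop n ≠ [] := by
        intro hnil
        have := List.drop_eq_nil_iff.mp hnil
        omega
      exact this h.symm
    have hEq : n = ys.length := by omega
    subst hEq
    simp [List.zipIdx, track]
  | cons c cs' ih =>
    intro n st h hn
    have hlt : n < ys.length := by
      by_contra hge
      rw [List.drop_eq_nil_iff.mpr (by omega)] at h
      simp at h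
    have hc : c = ys.getD n ' ' := by
      have h0 := congrArg (fun l => List.getD l 0 ' ') h
      simpa [List.getD_eq_getElem?_getD, List.getElem?_drop] using h0
    have hcs' : cs' = ys.drop (n + 1) := by
      have h0 := congrArg List.tail h
      simpa [List.tail_drop] using h0
    have hcast : ((n + 1 : Nat) : Int) = (n : Int) + 1 := by push_cast; ring
    have hcol : (((n + 1 : Nat) : Int) * 2) ::
        colStepB c (((n + 1 : Nat) : Int) * 2) (colF xs ys n) (xs.take (xs.length / 2))
        = colF xs ys (n + 1) := by
      rw [hc, hcast, colF]
    rw [List.zipIdx_cons, List.foldl_cons]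
    have hrange : List.range' (n + 1) (ys.length - n) =
        (n + 1) :: List.range' (n + 2) (ys.length - (n + 1)) := by
      rw [show ys.length - n = (ys.length - (n + 1)) + 1 from by omega]
      rw [List.range'_succ]
    rw [hrange, List.map_cons]
    conv_rhs => rw [track]
    simp only []
    rw [hcol]
    have hsplit : (if (colF xs ys (n + 1)).getD (xs.length / 2) 0 ≤ st.1 then
          (colF xs ys (n + 1), (colF xs ys (n + 1)).getD (xs.length / 2) 0, ((n + 1 : Nat) : Int))
        else (colF xs ys (n + 1), st.1, st.2))
        = (colF xs ys (n + 1),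
           if (colF xs ys (n + 1)).getD (xs.length / 2) 0 ≤ st.1 then
             ((colF xs ys (n + 1)).getD (xs.length / 2) 0, ((n + 1 : Nat) : Int))
           else st) := by
      split_ifs <;> rfl
    rw [hsplit]
    exact ih (n + 1)
      (if (colF xs ys (n + 1)).getD (xs.length / 2) 0 ≤ st.1 then
        ((colF xs ys (n + 1)).getD (xs.length / 2) 0, ((n + 1 : Nat) : Int))
      else st) hcs' (by omega)

theorem coupure_spec : Claim_equal_coupure := by
  intro x y _ hpre
  unfold Pre_coupure at hpre
  simp only [Spec_coupure, coupure, coupure_alt]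
  have hstop : 1 ≤ x.toList.length / 2 := by omega
  obtain ⟨hag, hlen, hhead, htrk⟩ := outer_inv x.toList y.toList (x.toList.length / 2) le_rfl
  rw [htrk hstop]
  rw [rowFold_eq_rowR x.toList y.toList (x.toList.length / 2) (Nat.div_le_self _ _)]
  have hcol0 : (List.range (x.toList.length / 2 + 1)).map (fun (i : Nat) => (i : Int) * 2)
      = colF x.toList y.toList 0 := rfl
  rw [hcol0]
  have hB := loopB x.toList y.toList y.toList 0
    ((colF x.toList y.toList 0).getD (x.toList.length / 2) 0, 0)
    (by simp) (by omega)
  simp only [Nat.zero_add, Nat.sub_zero] at hB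
  rw [hB]
  have hlist : (rowR x.toList y.toList (x.toList.length / 2)).drop 1 =
      (List.range' 1 y.toList.length).map
        (fun j => (colF x.toList y.toList j).getD (x.toList.length / 2) 0) := by
    apply List.ext_getElem
    · simp [rowR_length]
    · intro k h1 h2
      have hk : k < y.toList.length := by
        have hr := rowR_length x.toList y.toList (x.length / 2)
        have hr2 := rowR_length x.toList y.toList (x.toList.length / 2)
        simp only [List.length_drop] at h1 hr hr2
        omega
      have hmap : ((List.range' 1 y.toList.length).map
          (fun j => (colF x.toList y.toList j).getD (x.toList.length / 2) 0))[k]'h2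
          = (colF x.toList y.toList (1 + k)).getD (x.toList.length / 2) 0 := by
        simp [List.getElem_range']
      rw [hmap, col_eq_dspec x.toList y.toList (1 + k) _ le_rfl]
      have hg : (rowR x.toList y.toList (x.toList.length / 2)).drop 1 =
          (rowR x.toList y.toList (x.toList.length / 2)).drop 1 := rfl
      have hd : ((rowR x.toList y.toList (x.toList.length / 2)).drop 1)[k]'h1
          = (rowR x.toList y.toList (x.toList.length / 2)).getD (1 + k) 0 := by
        rw [List.getElem_drop]
        rw [List.getD_eq_getElem?_getD]
        rw [List.getElem?_eq_getElem (by rw [rowR_length]; omega)]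
        simp [Nat.add_comm]
      rw [hd, row_eq_dspec x.toList y.toList _ (1 + k) (by omega)]
  have hhd : (rowR x.toList y.toList (x.toList.length / 2)).getD 0 0 =
      (colF x.toList y.toList 0).getD (x.toList.length / 2) 0 := by
    rw [row_eq_dspec x.toList y.toList _ 0 (by omega), dspec_top,
      col_eq_dspec x.toList y.toList 0 (x.toList.length / 2) le_rfl, dspec_top]
  rw [hlist, hhd]
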